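-- pv_equiv track=rewrite | github.com/jmillanacosta/rdfsolve | src/rdfsolve/ontology/index.py | _ontologies_matching_uris
-- ===== SOURCE A (Python) =====
-- def _ontologies_matching_uris(
--     class_uris: set[str],
--     base_uri_to_ontology: dict[str, str],
-- ) -> set[str]:
--     """Return ontology IDs whose baseUri is a prefix of any class URI."""
--     matched: set[str] = set()
--     for base_uri, oid in base_uri_to_ontology.items():
--         for cu in class_uris:
--             if cu.startswith(base_uri):
--                 matched.add(oid)
--                 break
--     return matched
-- ===== SOURCE B (Python) =====
-- def _ontologies_matching_uris(
--     class_uris: set[str],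
--     base_uri_to_ontology: dict[str, str],
-- ) -> set[str]:
--     """Return ontology IDs whose baseUri is a prefix of any class URI."""
--     # Precompute the set of ALL prefixes of all class URIs once, then a
--     # single hash lookup per base URI replaces the inner scan over class_uris.
--     prefixes: set[str] = set()
--     for cu in class_uris:
--         for k in range(len(cu) + 1):
--             prefixes.add(cu[:k])
--     matched: set[str] = set()
--     for base_uri, oid in base_uri_to_ontology.items():
--         if base_uri in prefixes:
--             matched.add(oid)
--     return matched
-- ===== Notes on version B (the rewrite author's own statement) =====
-- stated objective: faster
-- what changed: Instead of scanning all class URIs for every base URI, B precomputes the hash set of all prefixes of all class URIs once, so each base URI is decided by one set lookup.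
import Mathlib
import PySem

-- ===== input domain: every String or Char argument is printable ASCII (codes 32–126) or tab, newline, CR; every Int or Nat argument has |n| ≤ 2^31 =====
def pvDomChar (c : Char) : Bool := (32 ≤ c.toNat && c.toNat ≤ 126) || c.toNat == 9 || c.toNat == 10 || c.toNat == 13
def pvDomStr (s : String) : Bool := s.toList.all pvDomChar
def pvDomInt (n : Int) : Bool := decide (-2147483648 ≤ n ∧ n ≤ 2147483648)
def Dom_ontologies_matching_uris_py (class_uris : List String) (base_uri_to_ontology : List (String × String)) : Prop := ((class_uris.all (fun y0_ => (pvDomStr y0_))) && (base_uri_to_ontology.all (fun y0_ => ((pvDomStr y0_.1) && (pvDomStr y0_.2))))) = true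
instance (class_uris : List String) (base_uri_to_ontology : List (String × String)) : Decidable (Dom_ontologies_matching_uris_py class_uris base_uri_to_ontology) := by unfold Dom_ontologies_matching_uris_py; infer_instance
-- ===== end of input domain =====

-- B precomputes the set of all prefixes of the class URIs once so that each base URI
-- is decided by a single set-membership test instead of a scan over all class URIs.


-- ===== PORT A =====
-- inner 'for cu in class_uris: if cu.startswith(base_uri): matched.add(oid); break'
def pvInnerA (matched : PySem.Set String) (base_uri oid : String) : List String → PySem.Set String
  | [] => matched
  | cu :: rest =>
      if PySem.Str.startswith cu base_uri then PySem.Set.add matched oid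
      else pvInnerA matched base_uri oid rest

def ontologies_matching_uris_py (class_uris : List String) (base_uri_to_ontology : List (String × String)) : List String :=
  base_uri_to_ontology.foldl
    (fun matched p => pvInnerA matched p.1 p.2 class_uris)
    PySem.Set.empty

-- ===== PORT B =====
-- 'for cu in class_uris: for k in range(len(cu)+1): prefixes.add(cu[:k])'
def pvPrefixes (class_uris : List String) : PySem.Set String :=
  class_uris.foldl
    (fun s cu =>
      (PySem.List.pyRange 0 (PySem.Str.len cu + 1) 1).foldl
        (fun s k => PySem.Set.add s (PySem.Str.slice cu none (some k))) s)
    PySem.Set.empty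

def ontologies_matching_uris_py_alt (class_uris : List String) (base_uri_to_ontology : List (String × String)) : List String :=
  let prefixes := pvPrefixes class_uris
  base_uri_to_ontology.foldl
    (fun matched p => if PySem.Set.contains prefixes p.1 then PySem.Set.add matched p.2 else matched)
    PySem.Set.empty

-- ===== PRECONDITION & SPEC =====
def Spec_ontologies_matching_uris_py (class_uris : List String) (base_uri_to_ontology : List (String × String)) (out : List String) : Prop := out = ontologies_matching_uris_py_alt class_uris base_uri_to_ontology
instance (class_uris : List String) (base_uri_to_ontology : List (String × String)) (out : List String) : Decidable (Spec_ontologies_matching_uris_py class_uris base_uri_to_ontology out) := by unfold Spec_ontologies_matching_uris_py; infer_instance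

-- ===== CLAIM (what is proved, stated in full; the proofs are below) =====
def Claim_equal_ontologies_matching_uris_py : Prop := ∀ (class_uris : List String) (base_uri_to_ontology : List (String × String)), Dom_ontologies_matching_uris_py class_uris base_uri_to_ontology → Spec_ontologies_matching_uris_py class_uris base_uri_to_ontology (ontologies_matching_uris_py class_uris base_uri_to_ontology)

-- ===== LEMMAS AND PROOFS =====

-- A's inner loop (scan with break) computes 'any'.
theorem pvInnerA_eq_any (matched : PySem.Set String) (base_uri oid : String) (l : List String) :
    pvInnerA matched base_uri oid l =
      if l.any (fun cu => PySem.Str.startswith cu base_uri) then PySem.Set.add matched oid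
      else matched := by
  induction l with
  | nil => simp [pvInnerA]
  | cons cu rest ih =>
      by_cases h : PySem.Chars.startswith cu.toList base_uri.toList = true
      · simp [pvInnerA, h]
      · simp [pvInnerA, h, ih]

-- membership in a fold of Set.add
theorem mem_foldl_add {β : Type} (f : β → String) (l : List β) (s : PySem.Set String) (x : String) :
    x ∈ l.foldl (fun s k => PySem.Set.add s (f k)) s ↔ x ∈ s ∨ ∃ k ∈ l, x = f k := by
  induction l generalizing s with
  | nil => simp
  | cons b rest ih =>
      simp only [List.foldl_cons, ih, PySem.Set.mem_add, List.mem_cons]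
      constructor
      · rintro (⟨h | h⟩ | ⟨k, hk, hx⟩)
        · exact Or.inl h
        · exact Or.inr ⟨b, Or.inl rfl, h⟩
        · exact Or.inr ⟨k, Or.inr hk, hx⟩
      · rintro (h | ⟨k, (rfl | hk), hx⟩)
        · exact Or.inl (Or.inl h)
        · exact Or.inl (Or.inr hx)
        · exact Or.inr ⟨k, hk, hx⟩

-- a string is some slice cu[:k], k ∈ range(len(cu)+1), iff it is a prefix of cu
theorem slice_range_iff_startswith (cu base : String) :
    (∃ k ∈ PySem.List.pyRange 0 (PySem.Str.len cu + 1) 1,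
        base = PySem.Str.slice cu none (some k)) ↔
      PySem.Str.startswith cu base = true := by
  simp only [PySem.List.mem_pyRange_one, PySem.Str.startswith_eq, PySem.Chars.startswith_iff]
  constructor
  · rintro ⟨k, ⟨hk0, _⟩, rfl⟩
    have h : (PySem.Str.slice cu none (some k)).toList = cu.toList.take k.toNat := by
      rw [PySem.Str.toList_slice, PySem.Chars.slice_eq_listSlice, PySem.List.slice_to _ _]
      omega
    rw [h]
    exact List.take_prefix _ _
  · intro hpre
    refine ⟨(base.toList.length : Int), ⟨by positivity, ?_⟩, ?_⟩
    · have := hpre.length_le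
      simp only [PySem.Str.len_eq]
      omega
    · have h : (PySem.Str.slice cu none (some (base.toList.length : Int))).toList
          = cu.toList.take base.toList.length := by
        rw [PySem.Str.toList_slice, PySem.Chars.slice_eq_listSlice,
          PySem.List.slice_to _ _]
        · simp
        · positivity
      have hb : base.toList = cu.toList.take base.toList.length :=
        List.prefix_iff_eq_take.mp hpre
      apply String.toList_injective
      rw [h, ← hb]

-- B's membership test computes the same 'any'
theorem contains_pvPrefixes (class_uris : List String) (base : String) :
    PySem.Set.contains (pvPrefixes class_uris) base =
      class_uris.any (fun cu => PySem.Str.startswith cu base) := by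
  have hmem : base ∈ pvPrefixes class_uris ↔
      ∃ cu ∈ class_uris, PySem.Str.startswith cu base = true := by
    unfold pvPrefixes
    have : ∀ (l : List String) (s : PySem.Set String),
        base ∈ l.foldl (fun s cu =>
          (PySem.List.pyRange 0 (PySem.Str.len cu + 1) 1).foldl
            (fun s k => PySem.Set.add s (PySem.Str.slice cu none (some k))) s) s ↔
        base ∈ s ∨ ∃ cu ∈ l, PySem.Str.startswith cu base = true := by
      intro l
      induction l with
      | nil => simp
      | cons cu rest ih =>
          intro s
          simp only [List.foldl_cons, ih, mem_foldl_add, List.mem_cons]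
          rw [slice_range_iff_startswith]
          constructor
          · rintro (⟨h | h⟩ | ⟨c, hc, hx⟩)
            · exact Or.inl h
            · exact Or.inr ⟨cu, Or.inl rfl, h⟩
            · exact Or.inr ⟨c, Or.inr hc, hx⟩
          · rintro (h | ⟨c, (rfl | hc), hx⟩)
            · exact Or.inl (Or.inl h)
            · exact Or.inl (Or.inr hx)
            · exact Or.inr ⟨c, hc, hx⟩
    rw [this]
    simp [PySem.Set.empty]
  rw [Bool.eq_iff_iff, List.any_eq_true, ← hmem]
  simp [PySem.Set.contains]

-- ===== VERDICT (by name: the statement is the Claim_ definition above) =====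
theorem ontologies_matching_uris_py_spec : Claim_equal_ontologies_matching_uris_py := by
  intro class_uris d _
  unfold Spec_ontologies_matching_uris_py ontologies_matching_uris_py ontologies_matching_uris_py_alt
  have hstep : (fun (matched : PySem.Set String) (p : String × String) =>
      pvInnerA matched p.1 p.2 class_uris) =
    (fun matched p =>
      if PySem.Set.contains (pvPrefixes class_uris) p.1 then PySem.Set.add matched p.2
      else matched) := by
    funext matched p
    rw [pvInnerA_eq_any, contains_pvPrefixes]
  rw [hstep]
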